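-- pv_equiv track=rewrite | github.com/ShanjinurIslam/HackerRank | beautiful_binary.py | beautifulBinaryString
-- ===== SOURCE A (Python) =====
-- def arr_to_str(arr):
--     string = ""
--     for each in arr:
--         string += each
--
--     return string
--
-- def beautifulBinaryString(binary):
--     stack = []
--     n = 0
--     count = 0
--
--     for b in binary:
--         if n < 2:
--             stack.append(b)
--             n += 1
--         else:
--             stack.append(b)
--             n += 1
--
--             start = n-3
--             end = n
--
--             temp = arr_to_str(stack[start:end])
--
--             if temp == "010":
--                 count += 1
--                 stack[end-1] = '1'
--
--
--     return count
-- ===== SOURCE B (Python) =====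
-- def beautifulBinaryString(binary):
--     count = 0
--     i = 0
--     while i < len(binary):
--         if binary[i:i+3] == "010":
--             count += 1
--             i += 3
--         else:
--             i += 1
--     return count
-- ===== Notes on version B (the rewrite author's own statement) =====
-- stated objective: faster
-- what changed: B drops A's growing stack and its rebuild-last-three-as-a-string check: it scans with one index, compares the 3-char slice at the current position and skips 3 on a match (1 otherwise), maintaining no auxiliary list.
import Mathlib
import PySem

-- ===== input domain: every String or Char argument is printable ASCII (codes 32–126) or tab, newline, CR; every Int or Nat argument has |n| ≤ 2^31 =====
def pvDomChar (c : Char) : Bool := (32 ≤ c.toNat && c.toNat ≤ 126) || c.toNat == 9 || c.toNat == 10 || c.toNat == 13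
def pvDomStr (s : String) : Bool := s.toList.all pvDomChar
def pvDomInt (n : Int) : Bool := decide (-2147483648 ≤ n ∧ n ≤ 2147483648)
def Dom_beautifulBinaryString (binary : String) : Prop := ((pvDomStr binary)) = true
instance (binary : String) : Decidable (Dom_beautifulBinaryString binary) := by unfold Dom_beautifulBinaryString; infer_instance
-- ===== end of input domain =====

-- B replaces A's stack + last-three-string rebuild with a plain index scan that skips 3 past each match (simpler, same O(n) cost).

-- ===== PORT A =====
-- arr_to_str: concatenate the chars one by one (strings as List Char)
def arrToStr (arr : List Char) : List Char :=
  arr.foldl (fun string each => string ++ [each]) []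

def aStep (st : List Char × Int × Int) (b : Char) : List Char × Int × Int :=
  let stack := st.1
  let n := st.2.1
  let count := st.2.2
  if n < 2 then
    (stack ++ [b], n + 1, count)
  else
    let stack := stack ++ [b]
    let n := n + 1
    let start := n - 3
    let e := n
    let temp := arrToStr (PySem.List.slice stack (some start) (some e))
    if temp = ['0', '1', '0'] then
      (PySem.List.pySetD stack (e - 1) '1', n, count + 1)
    else
      (stack, n, count)

def beautifulBinaryString (binary : String) : Int :=
  (binary.toList.foldl aStep ([], 0, 0)).2.2

-- ===== PORT B =====
-- while i < len(binary): if binary[i:i+3] == "010": count += 1; i += 3 else i += 1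
-- (recursion on the suffix starting at i; the slice is take 3 of that suffix)
def bGo (l : List Char) (count : Int) : Int :=
  if l = [] then count
  else if l.take 3 = ['0', '1', '0'] then bGo (l.drop 3) (count + 1)
  else bGo l.tail count
termination_by l.length
decreasing_by
  all_goals cases l <;> simp_all

def beautifulBinaryString_alt (binary : String) : Int :=
  bGo binary.toList 0

-- ===== PRECONDITION & SPEC =====
def Spec_beautifulBinaryString (binary : String) (out : Int) : Prop := out = beautifulBinaryString_alt binary
instance (binary : String) (out : Int) : Decidable (Spec_beautifulBinaryString binary out) := by unfold Spec_beautifulBinaryString; infer_instance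

-- ===== CLAIM (what is proved, stated in full; the proofs are below) =====
def Claim_equal_beautifulBinaryString : Prop := ∀ (binary : String), Dom_beautifulBinaryString binary → Spec_beautifulBinaryString binary (beautifulBinaryString binary)

-- ===== LEMMAS AND PROOFS =====

lemma bGo_short (t : List Char) (count : Int) (h : t.length < 3) : bGo t count = count := by
  match t with
  | [] => rw [bGo]; simp
  | [a] => rw [bGo]; simp [bGo]
  | [a, b] => rw [bGo]; simp; rw [bGo]; simp [bGo]
  | a :: b :: c :: t' => simp at h; omega

lemma bGo_one (x : Char) (xs : List Char) (count : Int) (hx : x ≠ '0') :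
    bGo (x :: xs) count = bGo xs count := by
  rw [bGo]
  simp [List.take_succ_cons, hx]

lemma arrToStr_id (l : List Char) : arrToStr l = l := by
  rw [arrToStr, PySem.List.foldl_append_singleton]
  simp

lemma main_inv (l : List Char) : ∀ (s t : List Char) (count : Int), t.length = 2 →
    (List.foldl aStep (s ++ t, ((s ++ t).length : Int), count) l).2.2 = bGo (t ++ l) count := by
  induction l with
  | nil =>
    intro s t count ht
    simp [List.foldl]
    rw [bGo_short t count (by omega)]
  | cons c rest ih =>
    intro s t count ht
    match t, ht with
    | [t0, t1], _ =>
    rw [List.foldl_cons]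
    have hstep : aStep (s ++ [t0, t1], ((s ++ [t0, t1]).length : Int), count) c =
        if [t0, t1, c] = ['0', '1', '0'] then
          ((s ++ [t0, t1, c]).set (s.length + 2) '1', ((s ++ [t0, t1]).length : Int) + 1, count + 1)
        else
          (s ++ [t0, t1, c], ((s ++ [t0, t1]).length : Int) + 1, count) := by
      rw [aStep]
      have hn2 : ¬ (((s ++ [t0, t1]).length : Int) < 2) := by simp; omega
      rw [if_neg hn2]
      have hstart : ((s ++ [t0, t1]).length : Int) + 1 - 3 = ((s.length : Nat) : Int) := by
        simp; omega
      have hend : ((s ++ [t0, t1]).length : Int) + 1 = ((s.length : Nat) : Int) + ((3 : Nat) : Int) := by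
        simp; omega
      have hstart2 : ((s.length : Nat) : Int) + ((3 : Nat) : Int) - 3 = ((s.length : Nat) : Int) := by
        push_cast; ring
      simp only [hend, hstart2]
      rw [show (s ++ [t0, t1]) ++ [c] = s ++ [t0, t1, c] by simp]
      rw [PySem.List.slice_natCast_add]
      rw [show ((s ++ [t0, t1, c]).drop s.length).take 3 = [t0, t1, c] by simp]
      rw [arrToStr_id]
      by_cases hm : [t0, t1, c] = ['0', '1', '0']
      · rw [if_pos hm, if_pos hm]
        have hidx : ((s.length : Nat) : Int) + ((3 : Nat) : Int) - 1 = (((s.length + 2 : Nat)) : Int) := by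
          simp; omega
        rw [hidx, PySem.List.pySetD_natCast]
      · rw [if_neg hm, if_neg hm]
    rw [hstep]
    by_cases hm : [t0, t1, c] = ['0', '1', '0']
    · rw [if_pos hm]
      obtain ⟨h0, h1, h2⟩ : t0 = '0' ∧ t1 = '1' ∧ c = '0' := by
        simpa using hm
      subst h0; subst h1; subst h2
      have hset : (s ++ ['0', '1', '0']).set (s.length + 2) '1' = (s ++ ['0']) ++ ['1', '1'] := by
        simp
      have hlen : ((s ++ ['0', '1']).length : Int) + 1 = (((s ++ ['0']) ++ ['1', '1']).length : Int) := by
        simp; omega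
      rw [hset, hlen, ih (s ++ ['0']) ['1', '1'] (count + 1) (by simp)]
      have hl1 : bGo ('1' :: '1' :: rest) (count + 1) = bGo rest (count + 1) := by
        rw [bGo_one '1' _ _ (by decide), bGo_one '1' _ _ (by decide)]
      have hr : bGo ('0' :: '1' :: '0' :: rest) count = bGo rest (count + 1) := by
        rw [bGo, if_neg (List.cons_ne_nil _ _)]
        rw [show List.take 3 ('0' :: '1' :: '0' :: rest) = ['0', '1', '0'] by simp]
        rw [if_pos rfl]
        simp
      exact hl1.trans hr.symm
    · rw [if_neg hm]
      have hassoc : s ++ [t0, t1, c] = (s ++ [t0]) ++ [t1, c] := by simp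
      have hlen : ((s ++ [t0, t1]).length : Int) + 1 = (((s ++ [t0]) ++ [t1, c]).length : Int) := by
        simp; omega
      rw [hassoc, hlen, ih (s ++ [t0]) [t1, c] count (by simp)]
      rw [show ([t0, t1] : List Char) ++ c :: rest = t0 :: t1 :: c :: rest from rfl]
      conv_rhs => rw [bGo]
      rw [if_neg (List.cons_ne_nil _ _)]
      rw [show List.take 3 (t0 :: t1 :: c :: rest) = [t0, t1, c] by simp]
      rw [if_neg hm]
      rfl

-- ===== VERDICT (by name: the statement is the Claim_ definition above) =====
theorem beautifulBinaryString_spec : Claim_equal_beautifulBinaryString := by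
  intro binary _
  unfold Spec_beautifulBinaryString beautifulBinaryString beautifulBinaryString_alt
  cases hl : binary.toList with
  | nil => simp [List.foldl, bGo]
  | cons a u =>
    cases u with
    | nil =>
      simp [List.foldl, aStep]
      rw [bGo_short [a] 0 (by simp)]
    | cons b rest =>
      have htwo : List.foldl aStep ([], 0, 0) (a :: b :: rest) =
          List.foldl aStep (([] : List Char) ++ [a, b], ((([] : List Char) ++ [a, b]).length : Int), 0) rest := by
        simp [List.foldl, aStep]
      rw [htwo, main_inv rest [] [a, b] 0 (by simp)]
      rfl
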